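-- pv_equiv track=rewrite | github.com/kwcckw/CogAlg | frame_2D_alg/frame_blobs_par_draft_chee.py | get_rim_blob
-- ===== SOURCE A (Python) =====
-- def get_rim_blob(blob_,height,width):
--     '''
--     generate rims' blobs
--     '''
--
--     # convert blobdert_ to 2D array
--     blob__ = [blob_[i:i+width] for i in range(0, len(blob_), width)]
--
--     blob_rims_ = []
--     for y in range(height):
--         for x in range(width):
--             # topleft
--             if y-1>=0 and x-1>=0: blob_topleft = blob__[y-1][x-1]
--             else: blob_topleft = []
--             # top
--             if y-1>=0: blob_top = blob__[y-1][x]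
--             else: blob_top = []
--             # topright
--             if y-1>=0 and x+1<=width-1: blob_topright = blob__[y-1][x+1]
--             else: blob_topright = []
--             # right
--             if x+1<=width-1: blob_right = blob__[y][x+1]
--             else: blob_right = []
--             # botright
--             if y+1<=height-1 and x+1<=width-1: blob_botright = blob__[y+1][x+1]
--             else: blob_botright = []
--             # bot
--             if y+1<=height-1: blob_bot = blob__[y+1][x]
--             else: blob_bot = []
--             # botleft
--             if y+1<=height-1 and x-1>=0: blob_botleft = blob__[y+1][x-1]
--             else: blob_botleft = []
--             # left
--             if x-1>=0: blob_left = blob__[y][x-1]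
--             else: blob_left = []
--
--             blob_rims_.append([blob_topleft,blob_top,blob_topright,blob_right,
--                                  blob_botright,blob_bot,blob_botleft,blob_left])
--
--     return blob_rims_
-- ===== SOURCE B (Python) =====
-- def get_rim_blob(blob_, height, width):
--     '''
--     generate rims' blobs
--     '''
--     # empty grid: no cells
--     if height <= 0 or width <= 0:
--         return []
--     # bordered (height+2) x (width+2) table: interior rows hold the reshaped
--     # blob rows (short rows filled up with []), the whole border is []
--     pad = [[[]] * (width + 2)]
--     for y in range(height):
--         row = blob_[y * width:(y + 1) * width]
--         pad.append([[]] + row + [[]] * (width + 1 - len(row)))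
--     pad.append([[]] * (width + 2))
--     # read the eight neighbors of center (y+1, x+1) directly, no bounds tests
--     return [[pad[y][x], pad[y][x + 1], pad[y][x + 2], pad[y + 1][x + 2],
--              pad[y + 2][x + 2], pad[y + 2][x + 1], pad[y + 2][x], pad[y + 1][x]]
--             for y in range(height) for x in range(width)]
-- ===== Notes on version B (the rewrite author's own statement) =====
-- stated objective: simpler
-- what changed: B replaces A's eight per-neighbor bounds tests by building a bordered (height+2)x(width+2) table whose border rows/columns are [] so every neighbor is one direct indexed read.
import Mathlib
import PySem

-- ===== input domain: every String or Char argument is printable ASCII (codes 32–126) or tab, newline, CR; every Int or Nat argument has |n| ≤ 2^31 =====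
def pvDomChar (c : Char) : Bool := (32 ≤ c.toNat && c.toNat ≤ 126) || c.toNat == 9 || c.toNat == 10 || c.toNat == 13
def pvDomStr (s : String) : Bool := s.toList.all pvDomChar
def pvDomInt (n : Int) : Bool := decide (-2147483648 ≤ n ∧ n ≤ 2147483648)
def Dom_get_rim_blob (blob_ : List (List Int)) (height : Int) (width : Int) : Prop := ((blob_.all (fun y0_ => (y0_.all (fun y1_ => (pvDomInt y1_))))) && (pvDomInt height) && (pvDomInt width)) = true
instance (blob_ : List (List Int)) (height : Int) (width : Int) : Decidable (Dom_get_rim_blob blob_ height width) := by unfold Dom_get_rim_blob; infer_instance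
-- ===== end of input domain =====

-- B replaces A's eight per-neighbor bounds tests by a bordered (height+2)×(width+2) table whose
-- border is [] so every neighbor is a direct read (objective: simpler).

-- ===== PORT A =====
-- blob__ = [blob_[i:i+width] for i in range(0, len(blob_), width)]
def pvBlob2 (blob_ : List (List Int)) (width : Int) : List (List (List Int)) :=
  (PySem.List.pyRange 0 (blob_.length : Int) width).map
    (fun i => PySem.List.slice blob_ (some i) (some (i + width)))

def get_rim_blob (blob_ : List (List Int)) (height : Int) (width : Int) : List (List (List Int)) :=
  let blob__ := pvBlob2 blob_ width
  (PySem.List.pyRange 0 height 1).foldl (fun acc y =>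
    (PySem.List.pyRange 0 width 1).foldl (fun acc x =>
      let blob_topleft := if y - 1 ≥ 0 ∧ x - 1 ≥ 0 then PySem.List.pyGetD (PySem.List.pyGetD blob__ (y-1) []) (x-1) [] else []
      let blob_top := if y - 1 ≥ 0 then PySem.List.pyGetD (PySem.List.pyGetD blob__ (y-1) []) x [] else []
      let blob_topright := if y - 1 ≥ 0 ∧ x + 1 ≤ width - 1 then PySem.List.pyGetD (PySem.List.pyGetD blob__ (y-1) []) (x+1) [] else []
      let blob_right := if x + 1 ≤ width - 1 then PySem.List.pyGetD (PySem.List.pyGetD blob__ y []) (x+1) [] else []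
      let blob_botright := if y + 1 ≤ height - 1 ∧ x + 1 ≤ width - 1 then PySem.List.pyGetD (PySem.List.pyGetD blob__ (y+1) []) (x+1) [] else []
      let blob_bot := if y + 1 ≤ height - 1 then PySem.List.pyGetD (PySem.List.pyGetD blob__ (y+1) []) x [] else []
      let blob_botleft := if y + 1 ≤ height - 1 ∧ x - 1 ≥ 0 then PySem.List.pyGetD (PySem.List.pyGetD blob__ (y+1) []) (x-1) [] else []
      let blob_left := if x - 1 ≥ 0 then PySem.List.pyGetD (PySem.List.pyGetD blob__ y []) (x-1) [] else []
      acc ++ [[blob_topleft, blob_top, blob_topright, blob_right,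
               blob_botright, blob_bot, blob_botleft, blob_left]]) acc) []

-- ===== PORT B =====
-- bordered table: border row [[]]*(width+2); interior row y = [[]] + blob_[y*w:(y+1)*w] + fill of []
def pvPad (blob_ : List (List Int)) (height : Int) (width : Int) : List (List (List Int)) :=
  [List.replicate (width + 2).toNat []] ++
  (PySem.List.pyRange 0 height 1).map (fun y =>
    let row := PySem.List.slice blob_ (some (y * width)) (some ((y + 1) * width))
    [([] : List Int)] ++ row ++ List.replicate (width + 1 - (row.length : Int)).toNat []) ++
  [List.replicate (width + 2).toNat []]

def get_rim_blob_alt (blob_ : List (List Int)) (height : Int) (width : Int) : List (List (List Int)) :=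
  if height ≤ 0 ∨ width ≤ 0 then []
  else
    let pad := pvPad blob_ height width
    (PySem.List.pyRange 0 height 1).flatMap (fun y =>
      (PySem.List.pyRange 0 width 1).map (fun x =>
        [PySem.List.pyGetD (PySem.List.pyGetD pad y []) x [],
         PySem.List.pyGetD (PySem.List.pyGetD pad y []) (x+1) [],
         PySem.List.pyGetD (PySem.List.pyGetD pad y []) (x+2) [],
         PySem.List.pyGetD (PySem.List.pyGetD pad (y+1) []) (x+2) [],
         PySem.List.pyGetD (PySem.List.pyGetD pad (y+2) []) (x+2) [],
         PySem.List.pyGetD (PySem.List.pyGetD pad (y+2) []) (x+1) [],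
         PySem.List.pyGetD (PySem.List.pyGetD pad (y+2) []) x [],
         PySem.List.pyGetD (PySem.List.pyGetD pad (y+1) []) x []]))

-- ===== PRECONDITION & SPEC =====
-- Pre_ excludes exactly the inputs on which A raises: width = 0 (range step 0 is a ValueError),
-- and grids where blob_ has fewer than height*width entries and some cell is actually read
-- (IndexError) — the sole short-blob_ shape A survives is the neighborless 1×1 grid.
def Pre_get_rim_blob (blob_ : List (List Int)) (height : Int) (width : Int) : Prop :=
  width ≠ 0 ∧ (height ≤ 0 ∨ width < 0 ∨ height * width ≤ (blob_.length : Int) ∨ (height = 1 ∧ width = 1))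
instance (blob_ : List (List Int)) (height : Int) (width : Int) : Decidable (Pre_get_rim_blob blob_ height width) := by unfold Pre_get_rim_blob; infer_instance

def pvWitness_get_rim_blob : List (List Int) × Int × Int := ([[1], [2], [0], [3]], 2, 2)

def Spec_get_rim_blob (blob_ : List (List Int)) (height : Int) (width : Int) (out : List (List (List Int))) : Prop := out = get_rim_blob_alt blob_ height width
instance (blob_ : List (List Int)) (height : Int) (width : Int) (out : List (List (List Int))) : Decidable (Spec_get_rim_blob blob_ height width out) := by unfold Spec_get_rim_blob; infer_instance

-- ===== CLAIM (what is proved, stated in full; the proofs are below) =====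
def Claim_equal_get_rim_blob : Prop := ∀ (blob_ : List (List Int)) (height : Int) (width : Int), Dom_get_rim_blob blob_ height width → Pre_get_rim_blob blob_ height width → Spec_get_rim_blob blob_ height width (get_rim_blob blob_ height width)


-- ===== LEMMAS AND PROOFS =====

-- the value of grid cell (v,u), [] outside the grid
def pvCell (blob_ : List (List Int)) (height width v u : Int) : List Int :=
  if 0 ≤ v ∧ v < height ∧ 0 ≤ u ∧ u < width then blob_.getD (v * width + u).toNat [] else []

-- interior row v of the bordered table, under enough data
theorem pvRow_eq (blob_ : List (List Int)) (height width v : Int)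
    (hw : 0 < width) (hlen : height * width ≤ (blob_.length : Int))
    (hv0 : 0 ≤ v) (hv : v < height) :
    ([] : List Int) :: (PySem.List.slice blob_ (some (v * width)) (some ((v + 1) * width)) ++
        List.replicate (width + 1 - ((PySem.List.slice blob_ (some (v * width)) (some ((v + 1) * width))).length : Int)).toNat [])
    = [] :: (List.take width.toNat (List.drop (v * width).toNat blob_) ++ [[]]) := by
  have hvwnn : (0:Int) ≤ v * width := mul_nonneg hv0 (by omega)
  have hvw : v * width + width ≤ (blob_.length : Int) := by
    calc v * width + width = (v + 1) * width := by ring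
    _ ≤ height * width := mul_le_mul_of_nonneg_right (by omega) (by omega)
    _ ≤ _ := hlen
  have h1 : (v + 1) * width = v * width + width := by ring
  rw [h1, PySem.List.slice_toNat _ hvwnn (by omega)]
  have h2 : (v * width + width).toNat - (v * width).toNat = width.toNat := by omega
  rw [h2]
  have h3 : (List.take width.toNat (List.drop (v * width).toNat blob_)).length = width.toNat := by
    simp only [List.length_take, List.length_drop]; omega
  rw [h3]
  have h4 : (width + 1 - ((width.toNat : Nat) : Int)).toNat = 1 := by omega
  rw [h4]
  rfl


theorem pvPad_read (blob_ : List (List Int)) (height width r c : Int)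
    (hh : 0 < height) (hw : 0 < width) (hlen : height * width ≤ (blob_.length : Int))
    (hr0 : 0 ≤ r) (hr : r ≤ height + 1) (hc0 : 0 ≤ c) (hc : c ≤ width + 1) :
    PySem.List.pyGetD (PySem.List.pyGetD (pvPad blob_ height width) r []) c []
      = pvCell blob_ height width (r - 1) (c - 1) := by
  have hcw : c.toNat < (width + 2).toNat := by omega
  by_cases hr1 : 1 ≤ r ∧ r ≤ height
  · -- interior row
    have houter : PySem.List.pyGetD (pvPad blob_ height width) r []
        = [([] : List Int)] ++ (List.take width.toNat (List.drop ((r-1) * width).toNat blob_)) ++ [[]] := by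
      rw [pvPad, PySem.List.pyGetD_of_nonneg _ _ hr0]
      obtain ⟨k, hk⟩ : ∃ k, r.toNat = k + 1 := ⟨r.toNat - 1, by omega⟩
      simp only [List.cons_append, List.nil_append]
      rw [hk, List.getD_cons_succ]
      rw [List.getD_append _ _ _ _ (by simp only [List.length_map, PySem.List.length_pyRange_one]; omega)]
      rw [← PySem.List.pyGetD_natCast]
      rw [PySem.List.pyGetD_map_pyRange_of_nonneg _ _ _ _ (by omega) (by omega)]
      have hkr : ((k:Nat) : Int) = r - 1 := by omega
      rw [hkr]
      exact pvRow_eq blob_ height width (r-1) hw hlen (by omega) (by omega)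
    rw [houter]
    -- inner read
    set row := List.take width.toNat (List.drop ((r-1) * width).toNat blob_) with hrow
    have hrowlen : row.length = width.toNat := by
      simp only [hrow, List.length_take, List.length_drop]
      have : (r-1) * width + width ≤ (blob_.length : Int) := by
        calc (r-1) * width + width = ((r-1) + 1) * width := by ring
        _ ≤ height * width := mul_le_mul_of_nonneg_right (by omega) (by omega)
        _ ≤ _ := hlen
      have hnn : (0:Int) ≤ (r-1) * width := mul_nonneg (by omega) (by omega)
      omega
    rw [PySem.List.pyGetD_of_nonneg _ _ hc0]
    by_cases hc1 : 1 ≤ c ∧ c ≤ width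
    · obtain ⟨j, hj⟩ : ∃ j, c.toNat = j + 1 := ⟨c.toNat - 1, by omega⟩
      simp only [List.cons_append, List.nil_append] at houter ⊢
      rw [hj, List.getD_cons_succ]
      have hjlt : j < row.length := by omega
      rw [List.getD_append _ _ _ _ (by simpa using hjlt)]
      have hnn : (0:Int) ≤ (r-1) * width := mul_nonneg (by omega) (by omega)
      have hvw : (r-1) * width + width ≤ (blob_.length : Int) := by
        calc (r-1) * width + width = ((r-1) + 1) * width := by ring
        _ ≤ height * width := mul_le_mul_of_nonneg_right (by omega) (by omega)
        _ ≤ _ := hlen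
      have hjblob : ((r-1) * width).toNat + j < blob_.length := by omega
      rw [List.getD_eq_getElem?_getD, hrow]
      rw [List.getElem?_take, List.getElem?_drop]  -- shapes?
      rw [List.getElem?_eq_getElem hjblob]
      simp only [if_pos (by omega : j < width.toNat), Option.getD_some]
      rw [pvCell, if_pos (by constructor <;> omega)]
      rw [List.getD_eq_getElem?_getD]
      have hblen : ((r-1) * width + (c-1)).toNat < blob_.length := by omega
      rw [List.getElem?_eq_getElem hblen]
      have hidx : ((r-1) * width).toNat + j = ((r-1) * width + (c-1)).toNat := by omega
      simp only [hidx]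
      rfl
    · -- c = 0 or c = width+1
      have hcell : pvCell blob_ height width (r-1) (c-1) = [] := by
        rw [pvCell, if_neg (by omega)]
      rw [hcell]
      rcases (by omega : c = 0 ∨ c = width + 1) with h0 | hwc
      · subst h0; rfl
      · subst hwc
        simp only [List.cons_append, List.nil_append]
        have : (width + 1).toNat = row.length + 1 := by omega
        rw [this, List.getD_cons_succ, List.getD_append_right _ _ _ _ (by omega)]
        simp
  · -- border rows r = 0 or r = height+1
    have houter : PySem.List.pyGetD (pvPad blob_ height width) r []
        = List.replicate (width + 2).toNat [] := by
      rw [pvPad, PySem.List.pyGetD_of_nonneg _ _ hr0]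
      rcases (by omega : r = 0 ∨ r = height + 1) with h0 | hhr
      · subst h0; rfl
      · subst hhr
        simp only [List.cons_append, List.nil_append]
        have : (height + 1).toNat = height.toNat + 1 := by omega
        rw [this, List.getD_cons_succ,
          List.getD_append_right _ _ _ _ (by simp only [List.length_map, PySem.List.length_pyRange_one]; omega)]
        simp [PySem.List.length_pyRange_one]
    rw [houter, PySem.List.pyGetD_of_nonneg _ _ hc0,
      List.getD_eq_getElem?_getD, List.getElem?_replicate]
    rw [if_pos hcw]
    rw [pvCell, if_neg (by omega)]
    rfl

theorem pvBlob2_read (blob_ : List (List Int)) (height width v u : Int)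
    (hw : 0 < width) (hlen : height * width ≤ (blob_.length : Int))
    (hv0 : 0 ≤ v) (hv : v < height) (hu0 : 0 ≤ u) (hu : u < width) :
    PySem.List.pyGetD (PySem.List.pyGetD (pvBlob2 blob_ width) v []) u []
      = blob_.getD (v * width + u).toNat [] := by
  have hvw : v * width + width ≤ (blob_.length : Int) := by
    calc v * width + width = (v + 1) * width := by ring
    _ ≤ height * width := mul_le_mul_of_nonneg_right (by omega) (by omega)
    _ ≤ _ := hlen
  have hvwnn : (0:Int) ≤ v * width := mul_nonneg hv0 (by omega)
  have hvwlt : v * width < (blob_.length : Int) := by omega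
  have hlenpos : (0:Int) < (blob_.length : Int) := by omega
  rw [pvBlob2, PySem.List.pyRange_of_pos _ _ hw, List.map_map,
    PySem.List.pyGetD_of_nonneg _ _ hv0]
  have hediv : v + 1 ≤ ((blob_.length : Int) - 0 + width - 1) / width := by
    rw [Int.le_ediv_iff_mul_le hw]; nlinarith
  have hlt : v.toNat < (if (0:Int) < (blob_.length : Int) then (((blob_.length : Int) - 0 + width - 1) / width).toNat else 0) := by
    rw [if_pos hlenpos]; omega
  rw [PySem.List.getD_map_range _ _ _ _ hlt]
  simp only [Function.comp, zero_add]
  have hnn : (0:Int) ≤ width * (v.toNat : Int) := by positivity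
  have harith : width * ((v.toNat : Nat) : Int) = v * width := by
    rw [Int.toNat_of_nonneg hv0]; ring
  rw [PySem.List.slice_toNat _ hnn (by omega), harith, PySem.List.pyGetD_of_nonneg _ _ hu0,
    List.getD_eq_getElem?_getD, List.getD_eq_getElem?_getD]
  have hulen : u.toNat < (List.take ((v * width + width).toNat - (v * width).toNat) (List.drop (v * width).toNat blob_)).length := by
    simp only [List.length_take, List.length_drop]
    omega
  rw [List.getElem?_eq_getElem hulen, List.getElem_take, List.getElem_drop]
  have hblen : (v * width + u).toNat < blob_.length := by omega
  rw [List.getElem?_eq_getElem hblen]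
  have hidx : (v * width).toNat + u.toNat = (v * width + u).toNat := by omega
  simp only [hidx]



theorem pvA_cell (blob_ : List (List Int)) (height width v u : Int)
    (hw : 0 < width) (hlen : height * width ≤ (blob_.length : Int))
    (g : Prop) [Decidable g] (hiff : g ↔ (0 ≤ v ∧ v < height ∧ 0 ≤ u ∧ u < width)) :
    (if g then PySem.List.pyGetD (PySem.List.pyGetD (pvBlob2 blob_ width) v []) u [] else [])
      = pvCell blob_ height width v u := by
  by_cases hg : g
  · obtain ⟨h1, h2, h3, h4⟩ := hiff.mp hg
    rw [if_pos hg, pvCell, if_pos (hiff.mp hg),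
      pvBlob2_read blob_ height width v u hw hlen h1 h2 h3 h4]
  · rw [if_neg hg, pvCell, if_neg (fun hc => hg (hiff.mpr hc))]

theorem pv_main (blob_ : List (List Int)) (height width : Int)
    (hh : 0 < height) (hw : 0 < width) (hlen : height * width ≤ (blob_.length : Int)) :
    get_rim_blob blob_ height width = get_rim_blob_alt blob_ height width := by
  rw [get_rim_blob, get_rim_blob_alt, if_neg (by omega)]
  simp only [PySem.List.foldl_append_singleton_eq_map, PySem.List.foldl_append_eq_flatMap,
    List.nil_append]
  apply List.flatMap_congr
  intro y hy
  have hy' : 0 ≤ y ∧ y < height := (PySem.List.mem_pyRange_one).mp hy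
  apply List.map_congr_left
  intro x hx
  have hx' : 0 ≤ x ∧ x < width := (PySem.List.mem_pyRange_one).mp hx
  rw [pvA_cell blob_ height width (y-1) (x-1) hw hlen _ (by constructor <;> intro <;> omega),
    pvA_cell blob_ height width (y-1) x hw hlen _ (by constructor <;> intro <;> omega),
    pvA_cell blob_ height width (y-1) (x+1) hw hlen _ (by constructor <;> intro <;> omega),
    pvA_cell blob_ height width y (x+1) hw hlen _ (by constructor <;> intro <;> omega),
    pvA_cell blob_ height width (y+1) (x+1) hw hlen _ (by constructor <;> intro <;> omega),
    pvA_cell blob_ height width (y+1) x hw hlen _ (by constructor <;> intro <;> omega),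
    pvA_cell blob_ height width (y+1) (x-1) hw hlen _ (by constructor <;> intro <;> omega),
    pvA_cell blob_ height width y (x-1) hw hlen _ (by constructor <;> intro <;> omega),
    pvPad_read blob_ height width y x hh hw hlen (by omega) (by omega) (by omega) (by omega),
    pvPad_read blob_ height width y (x+1) hh hw hlen (by omega) (by omega) (by omega) (by omega),
    pvPad_read blob_ height width y (x+2) hh hw hlen (by omega) (by omega) (by omega) (by omega),
    pvPad_read blob_ height width (y+1) (x+2) hh hw hlen (by omega) (by omega) (by omega) (by omega),
    pvPad_read blob_ height width (y+2) (x+2) hh hw hlen (by omega) (by omega) (by omega) (by omega),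
    pvPad_read blob_ height width (y+2) (x+1) hh hw hlen (by omega) (by omega) (by omega) (by omega),
    pvPad_read blob_ height width (y+2) x hh hw hlen (by omega) (by omega) (by omega) (by omega),
    pvPad_read blob_ height width (y+1) x hh hw hlen (by omega) (by omega) (by omega) (by omega)]
  have e1 : y + 1 - 1 = y := by ring
  have e2 : x + 1 - 1 = x := by ring
  have e3 : y + 2 - 1 = y + 1 := by ring
  have e4 : x + 2 - 1 = x + 1 := by ring
  rw [e1, e2, e3, e4]


-- ===== VERDICT (by name: the statement is the Claim_ definition above) =====
theorem get_rim_blob_spec : Claim_equal_get_rim_blob := by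
  intro blob_ height width _ hpre
  obtain ⟨hw0, hd⟩ := hpre
  unfold Spec_get_rim_blob
  by_cases hh : height ≤ 0
  · rw [get_rim_blob_alt, if_pos (Or.inl hh), get_rim_blob]
    simp [PySem.List.pyRange_one_eq_nil hh]
  · by_cases hwneg : width < 0
    · rw [get_rim_blob_alt, if_pos (Or.inr (by omega)), get_rim_blob]
      simp [PySem.List.pyRange_one_eq_nil (by omega : width ≤ (0:Int)), List.foldl_fixed]
    · have hhpos : 0 < height := by omega
      have hwpos : 0 < width := by omega
      rcases hd with h | h | h | h
      · omega
      · omega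
      · exact pv_main blob_ height width hhpos hwpos h
      · by_cases hlen : 1 ≤ (blob_.length : Int)
        · refine pv_main blob_ height width hhpos hwpos ?_
          rw [h.1, h.2]; simpa using hlen
        · have hb : blob_ = [] := List.length_eq_zero_iff.mp (by omega)
          subst hb; rw [h.1, h.2]; decide
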